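-- pv_equiv track=rewrite | github.com/Ir1svanquish/Python-Codes | logs_manipulation.py | get_M_longest_woods
-- ===== SOURCE A (Python) =====
-- def get_M_longest_woods(woods, M):
--     if len(woods) < M:
--         return [-1]
--     else:
--         longest_logs = sorted(woods, reverse = True)
--         result = [0 for _ in range(M)]
--         for n in range(M):
--             result[n] = longest_logs.index(woods[n])
--         return result
-- ===== SOURCE B (Python) =====
-- def get_M_longest_woods(woods, M):
--     if len(woods) < M:
--         return [-1]
--     return [sum(1 for w in woods if w > woods[n]) for n in range(M)]
-- ===== Notes on version B (the rewrite author's own statement) =====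
-- stated objective: simpler
-- what changed: Replaces sort-then-repeated-.index lookups with a direct counting comprehension: the descending-sort index of woods[n] equals the number of elements strictly greater than it.
import Mathlib
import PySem

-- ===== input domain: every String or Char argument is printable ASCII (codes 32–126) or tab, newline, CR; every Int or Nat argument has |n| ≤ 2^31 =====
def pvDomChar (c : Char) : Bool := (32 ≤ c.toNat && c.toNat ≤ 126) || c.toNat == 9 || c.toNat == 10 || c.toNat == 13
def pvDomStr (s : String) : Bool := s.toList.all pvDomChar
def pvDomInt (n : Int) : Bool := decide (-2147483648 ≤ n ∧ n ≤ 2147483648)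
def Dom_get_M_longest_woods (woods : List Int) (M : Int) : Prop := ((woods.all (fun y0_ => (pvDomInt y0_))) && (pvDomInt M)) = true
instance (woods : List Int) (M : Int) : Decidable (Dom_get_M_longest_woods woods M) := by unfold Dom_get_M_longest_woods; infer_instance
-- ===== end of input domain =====

-- B replaces sort + repeated .index by directly counting strictly greater elements (objective: simpler).

-- ===== PORT A =====
-- the pyGetD/getD defaults are unreachable: 0 ≤ n < M ≤ len(woods) and woods[n] ∈ longest_logs
def get_M_longest_woods (woods : List Int) (M : Int) : List Int :=
  if (woods.length : Int) < M then [-1]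
  else
    let longest_logs := PySem.List.sorted woods (fun x => x) true
    let result := (PySem.List.pyRange 0 M 1).map (fun _ => (0 : Int))
    (PySem.List.pyRange 0 M 1).foldl
      (fun res n =>
        PySem.List.pySetD res n
          (((PySem.List.index? longest_logs (PySem.List.pyGetD woods n 0)).getD 0 : Nat) : Int))
      result

-- ===== PORT B =====
def get_M_longest_woods_alt (woods : List Int) (M : Int) : List Int :=
  if (woods.length : Int) < M then [-1]
  else
    (PySem.List.pyRange 0 M 1).map (fun n =>
      woods.foldl (fun acc w => if PySem.List.pyGetD woods n 0 < w then acc + 1 else acc) (0 : Int))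

-- ===== PRECONDITION & SPEC =====
def Spec_get_M_longest_woods (woods : List Int) (M : Int) (out : List Int) : Prop := out = get_M_longest_woods_alt woods M
instance (woods : List Int) (M : Int) (out : List Int) : Decidable (Spec_get_M_longest_woods woods M out) := by unfold Spec_get_M_longest_woods; infer_instance

-- ===== CLAIM (what is proved, stated in full; the proofs are below) =====
def Claim_equal_get_M_longest_woods : Prop := ∀ (woods : List Int) (M : Int), Dom_get_M_longest_woods woods M → Spec_get_M_longest_woods woods M (get_M_longest_woods woods M)

-- ===== LEMMAS AND PROOFS =====

-- first index of v in a descending-sorted list = number of strictly greater elements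
lemma index?_sorted_desc (s : List Int) (hs : s.Pairwise (fun a b => b ≤ a)) (v : Int)
    (hv : v ∈ s) :
    PySem.List.index? s v = some (s.countP (fun w => decide (v < w))) := by
  induction s with
  | nil => cases hv
  | cons x t ih =>
    rcases List.pairwise_cons.mp hs with ⟨hx, ht⟩
    by_cases hxv : x = v
    · subst hxv
      rw [PySem.List.index?_cons_self]
      have h0 : t.countP (fun w => decide (x < w)) = 0 := by
        apply List.countP_eq_zero.mpr
        intro w hw
        simpa using not_lt.mpr (hx w hw)
      simp [h0]
    · have hvt : v ∈ t := by
        rcases List.mem_cons.mp hv with h | h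
        · exact absurd h.symm hxv
        · exact h
      have hvx : v < x := lt_of_le_of_ne (hx v hvt) (fun h => hxv h.symm)
      rw [PySem.List.index?_cons_of_ne t hxv, ih ht hvt]
      simp [hvx, Nat.add_comm]

-- a loop 'for i in range(k): res[i] = g i' over a buffer of length ≥ k
lemma foldl_set_range (g : Nat → Int) :
    ∀ (k : Nat) (init : List Int), k ≤ init.length →
      (List.range k).foldl (fun res i => res.set i (g i)) init
        = (List.range k).map g ++ init.drop k := by
  intro k
  induction k with
  | zero => simp
  | succ k ih =>
    intro init hk
    have hk' : k < init.length := Nat.lt_of_succ_le hk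
    rw [List.range_succ, List.foldl_append, ih init (Nat.le_of_lt hk')]
    have hlen : ((List.range k).map g).length = k := by simp
    have hdrop : init.drop k = init[k] :: init.drop (k + 1) :=
      (List.getElem_cons_drop hk').symm
    rw [List.foldl_cons, List.foldl_nil, List.map_append, List.map_singleton,
      List.append_assoc]
    rw [List.set_append_right _ _ (by omega), hlen, Nat.sub_self, hdrop, List.set_cons_zero]
    simp

theorem get_M_longest_woods_spec_aux (woods : List Int) (M : Int) :
    get_M_longest_woods woods M = get_M_longest_woods_alt woods M := by
  unfold get_M_longest_woods get_M_longest_woods_alt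
  by_cases h : (woods.length : Int) < M
  · simp [h]
  · simp only [h, if_false]
    have hM : M.toNat ≤ woods.length := by omega
    rw [PySem.List.pyRange_one 0 M]
    simp only [Int.sub_zero, zero_add, List.foldl_map, List.map_map]
    have hinit : ((List.range M.toNat).map (fun _ => (0 : Int))).length = M.toNat := by simp
    rw [show (fun (res : List Int) (k : Nat) =>
          PySem.List.pySetD res (k : Int)
            (((PySem.List.index? (PySem.List.sorted woods (fun x => x) true)
                (PySem.List.pyGetD woods (k : Int) 0)).getD 0 : Nat) : Int))
        = (fun res k => res.set k
            (((PySem.List.index? (PySem.List.sorted woods (fun x => x) true)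
                (PySem.List.pyGetD woods (k : Int) 0)).getD 0 : Nat) : Int)) from by
          funext res k; rw [PySem.List.pySetD_natCast]]
    rw [foldl_set_range _ M.toNat _ (by simp)]
    rw [List.drop_eq_nil_of_le (by simp), List.append_nil]
    apply List.map_congr_left
    intro i hi
    have hi' : i < woods.length := lt_of_lt_of_le (List.mem_range.mp hi) hM
    have hget : PySem.List.pyGetD woods (i : Int) 0 = woods[i] :=
      PySem.List.pyGetD_ofNat woods i 0 hi'
    have hmem : woods[i] ∈ PySem.List.sorted woods (fun x => x) true := by
      rw [PySem.List.mem_sorted]; exact List.getElem_mem hi'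
    have hpair : (PySem.List.sorted woods (fun x => x) true).Pairwise (fun a b => b ≤ a) :=
      PySem.List.sorted_pairwise_rev woods (fun x => x)
    rw [hget, index?_sorted_desc _ hpair _ hmem]
    simp [hget, PySem.List.foldl_ite_add_one,
      (PySem.List.sorted_perm woods (fun x => x) true).countP_eq]

-- ===== VERDICT (by name: the statement is the Claim_ definition above) =====
theorem get_M_longest_woods_spec : Claim_equal_get_M_longest_woods := by
  intro woods M _
  exact get_M_longest_woods_spec_aux woods M
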